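-- pv_equiv track=rewrite | github.com/aainc/lawsy-pharma | src/lawsy/ai/report_writer.py | _split_outline
-- ===== SOURCE A (Python) =====
-- def _split_outline(outline: str):
--     lines = outline.splitlines()
--     overall_title = ""
--     sections = []
--     current_section = []
--     for line in lines:
--         if line.startswith("# ") and not line.startswith("##"):
--             overall_title = line.strip()
--         elif line.startswith("## "):
--             if current_section:
--                 sections.append("\n".join(current_section))
--                 current_section = []
--             current_section.append(line.strip())
--         elif current_section:
--             current_section.append(line.strip())
--     if current_section:
--         sections.append("\n".join(current_section))
--     return overall_title, sections
-- ===== SOURCE B (Python) =====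
-- def _split_outline(outline: str):
--     lines = outline.splitlines()
--
--     def is_title(line):
--         return line.startswith("# ") and not line.startswith("##")
--
--     # last title line wins; "" if there is none
--     overall_title = next((l.strip() for l in reversed(lines) if is_title(l)), "")
--     # title lines never appear in section content
--     body = [l for l in lines if not is_title(l)]
--     # lines before the first '## ' header are dropped
--     while body and not body[0].startswith("## "):
--         body.pop(0)
--     sections = []
--     for l in body:
--         if l.startswith("## "):
--             sections.append(l.strip())
--         else:
--             sections[-1] = sections[-1] + "\n" + l.strip()
--     return overall_title, sections
-- ===== Notes on version B (the rewrite author's own statement) =====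
-- stated objective: alternative
-- what changed: Replaces A's single pass with a mutable (title, sections, current_section) accumulator by three independent phases: a reverse scan for the last title line, a filter removing title lines plus a drop of the pre-header prefix, and a grouping pass that appends each stripped line directly onto the last section string instead of buffering lines and joining them.
import Mathlib
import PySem

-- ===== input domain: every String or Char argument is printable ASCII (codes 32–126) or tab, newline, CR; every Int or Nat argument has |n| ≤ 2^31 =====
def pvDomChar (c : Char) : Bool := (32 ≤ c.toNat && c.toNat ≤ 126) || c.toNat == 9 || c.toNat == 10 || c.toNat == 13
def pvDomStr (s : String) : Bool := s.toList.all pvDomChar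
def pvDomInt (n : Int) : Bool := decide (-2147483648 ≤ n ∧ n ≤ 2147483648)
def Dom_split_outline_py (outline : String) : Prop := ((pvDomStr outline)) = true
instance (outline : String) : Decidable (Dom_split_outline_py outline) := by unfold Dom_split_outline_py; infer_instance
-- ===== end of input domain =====

-- B replaces A's single mutable-accumulator pass by three phases (reverse scan for the last
-- title, filter + prefix drop, then grouping that extends the last section string); alternative
-- decomposition, same cost.


-- ===== PORT A =====
-- the for-loop over lines with state (overall_title, sections, current_section)
def splitOutlineLoopA : List String → String → List String → List String → String × List String
  | [], t, secs, cur =>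
      (t, if cur.isEmpty then secs else secs ++ [PySem.Str.join "\n" cur])
  | l :: ls, t, secs, cur =>
      if PySem.Str.startswith l "# " && !PySem.Str.startswith l "##" then
        splitOutlineLoopA ls (PySem.Str.strip l) secs cur
      else if PySem.Str.startswith l "## " then
        splitOutlineLoopA ls t
          (if cur.isEmpty then secs else secs ++ [PySem.Str.join "\n" cur])
          [PySem.Str.strip l]
      else if !cur.isEmpty then
        splitOutlineLoopA ls t secs (cur ++ [PySem.Str.strip l])
      else
        splitOutlineLoopA ls t secs cur

def split_outline_py (outline : String) : String × List String :=
  splitOutlineLoopA (PySem.Str.splitlines outline) "" [] []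

-- ===== PORT B =====
-- is_title helper of Source B
def pvIsTitle (l : String) : Bool :=
  PySem.Str.startswith l "# " && !PySem.Str.startswith l "##"

-- body of Source B's grouping for-loop; the else branch is 'sections[-1] = sections[-1] + "\n" + l.strip()'
-- (sections is never empty there in Source B; getLastD/dropLast render the same update totally)
def splitOutlineStepB (secs : List String) (l : String) : List String :=
  if PySem.Str.startswith l "## " then secs ++ [PySem.Str.strip l]
  else secs.dropLast ++ [secs.getLastD "" ++ "\n" ++ PySem.Str.strip l]

def split_outline_py_alt (outline : String) : String × List String :=
  let lines := PySem.Str.splitlines outline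
  let overallTitle :=
    match lines.reverse.find? pvIsTitle with
    | some l => PySem.Str.strip l
    | none => ""
  -- '[l for l in lines if not is_title(l)]' then the while-pop loop = dropWhile
  let body := (lines.filter (fun l => !pvIsTitle l)).dropWhile
      (fun l => !PySem.Str.startswith l "## ")
  (overallTitle, body.foldl splitOutlineStepB [])

-- ===== PRECONDITION & SPEC =====
def Spec_split_outline_py (outline : String) (out : String × List String) : Prop := out = split_outline_py_alt outline
instance (outline : String) (out : String × List String) : Decidable (Spec_split_outline_py outline out) := by unfold Spec_split_outline_py; infer_instance

-- ===== CLAIM (what is proved, stated in full; the proofs are below) =====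
def Claim_equal_split_outline_py : Prop := ∀ (outline : String), Dom_split_outline_py outline → Spec_split_outline_py outline (split_outline_py outline)

-- ===== LEMMAS AND PROOFS =====

-- the title component of A's loop, as a foldl
def pvLastTitle (ls : List String) (t : String) : String :=
  ls.foldl (fun a l => if pvIsTitle l then PySem.Str.strip l else a) t

-- the sections component of A's loop, on title-free lines
def pvLoopS : List String → List String → List String → List String
  | [], secs, cur => if cur.isEmpty then secs else secs ++ [PySem.Str.join "\n" cur]
  | l :: ls, secs, cur =>
      if PySem.Str.startswith l "## " then
        pvLoopS ls (if cur.isEmpty then secs else secs ++ [PySem.Str.join "\n" cur])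
          [PySem.Str.strip l]
      else if !cur.isEmpty then pvLoopS ls secs (cur ++ [PySem.Str.strip l])
      else pvLoopS ls secs cur

theorem loopA_eq (ls : List String) : ∀ (t : String) (secs cur : List String),
    splitOutlineLoopA ls t secs cur =
      (pvLastTitle ls t, pvLoopS (ls.filter (fun l => !pvIsTitle l)) secs cur) := by
  induction ls with
  | nil => intro t secs cur; simp [splitOutlineLoopA, pvLastTitle, pvLoopS]
  | cons l ls ih =>
    intro t secs cur
    by_cases ht : pvIsTitle l = true
    · have ht' : (PySem.Str.startswith l "# " && !PySem.Str.startswith l "##") = true := ht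
      have hl : pvLastTitle (l :: ls) t = pvLastTitle ls (PySem.Str.strip l) := by
        simp [pvLastTitle, ht]
      have hf : (l :: ls).filter (fun x => !pvIsTitle x) = ls.filter (fun x => !pvIsTitle x) := by
        simp [ht]
      simp only [splitOutlineLoopA]
      rw [if_pos ht', ih, hl, hf]
    · have ht2 : (PySem.Str.startswith l "# " && !PySem.Str.startswith l "##") = false :=
        Bool.eq_false_iff.mpr ht
      have hl : pvLastTitle (l :: ls) t = pvLastTitle ls t := by
        simp [pvLastTitle, ht]
      have hf : (l :: ls).filter (fun x => !pvIsTitle x) = l :: ls.filter (fun x => !pvIsTitle x) := by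
        simp [ht]
      simp only [splitOutlineLoopA]
      rw [if_neg (Bool.eq_false_iff.mp ht2)]
      by_cases hh : PySem.Str.startswith l "## " = true
      · rw [if_pos hh, ih, hl, hf]
        simp only [pvLoopS]
        rw [if_pos hh]
      · rw [if_neg hh]
        by_cases hc : cur.isEmpty = true
        · rw [if_neg (show ¬((!cur.isEmpty) = true) by simp [hc]), ih, hl, hf]
          simp only [pvLoopS]
          rw [if_neg hh, if_neg (show ¬((!cur.isEmpty) = true) by simp [hc])]
        · have hc2 : (!cur.isEmpty) = true := by
            simp only [Bool.not_eq_true] at hc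
            simp [hc]
          rw [if_pos hc2, ih, hl, hf]
          simp only [pvLoopS]
          rw [if_neg hh, if_pos hc2]

-- last-title-wins equals the first title of the reversed list
theorem lastTitle_eq_find (ls : List String) : ∀ t : String,
    pvLastTitle ls t =
      (match ls.reverse.find? pvIsTitle with
       | some l => PySem.Str.strip l
       | none => t) := by
  induction ls with
  | nil => intro t; simp [pvLastTitle]
  | cons l ls ih =>
    intro t
    have h0 : pvLastTitle (l :: ls) t
        = pvLastTitle ls (if pvIsTitle l then PySem.Str.strip l else t) := by
      simp [pvLastTitle]
    rw [h0, ih]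
    simp only [List.reverse_cons, List.find?_append]
    cases hf : ls.reverse.find? pvIsTitle with
    | some a => simp
    | none => by_cases ht : pvIsTitle l = true <;> simp [List.find?, ht]

-- joining one extra element onto a nonempty buffer appends sep + element
theorem chars_join_concat (sep cs : List Char) :
    ∀ css : List (List Char), css ≠ [] →
      PySem.Chars.join sep (css ++ [cs]) = PySem.Chars.join sep css ++ sep ++ cs := by
  intro css
  induction css with
  | nil => intro h; simp at h
  | cons a css ih =>
    intro _
    cases css with
    | nil => simp [PySem.Chars.join_cons_cons, PySem.Chars.join_singleton]
    | cons b css =>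
      have h2 := ih (by simp)
      simp only [List.cons_append, PySem.Chars.join_cons_cons] at h2 ⊢
      simp [h2]

theorem join_singleton_str (s : String) : PySem.Str.join "\n" [s] = s := by
  apply String.toList_injective
  simp [PySem.Str.toList_join, PySem.Chars.join_singleton]

theorem join_concat (cur : List String) (s : String) (h : cur ≠ []) :
    PySem.Str.join "\n" (cur ++ [s]) = PySem.Str.join "\n" cur ++ "\n" ++ s := by
  apply String.toList_injective
  simp only [PySem.Str.toList_join, List.map_append, List.map_cons, List.map_nil,
    String.toList_append]
  rw [chars_join_concat _ _ _ (by simpa using h)]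

-- with an empty current section, leading non-header lines are skipped
theorem loopS_dropWhile (ls : List String) : ∀ secs : List String,
    pvLoopS ls secs [] =
      pvLoopS (ls.dropWhile (fun l => !PySem.Str.startswith l "## ")) secs [] := by
  induction ls with
  | nil => intro secs; simp
  | cons l ls ih =>
    intro secs
    by_cases hh : PySem.Str.startswith l "## " = true
    · rw [List.dropWhile_cons_of_neg (by simp only [hh, Bool.not_true]; decide)]
    · have hh2 : PySem.Str.startswith l "## " = false := Bool.eq_false_iff.mpr hh
      rw [List.dropWhile_cons_of_pos (by simp only [hh2, Bool.not_false])]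
      simp only [pvLoopS]
      rw [if_neg hh, if_neg (show ¬((!List.isEmpty ([] : List String)) = true) by decide)]
      exact ih secs

-- grouping invariant: a nonempty current section is exactly the last section string of B
theorem loopS_eq_foldB (ls : List String) : ∀ (secs cur : List String), cur ≠ [] →
    pvLoopS ls secs cur =
      ls.foldl splitOutlineStepB (secs ++ [PySem.Str.join "\n" cur]) := by
  induction ls with
  | nil =>
    intro secs cur h
    simp [pvLoopS, List.isEmpty_iff, h]
  | cons l ls ih =>
    intro secs cur h
    have hce : ¬(cur.isEmpty = true) := by simp [List.isEmpty_iff, h]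
    by_cases hh : PySem.Str.startswith l "## " = true
    · have h1 : pvLoopS (l :: ls) secs cur =
          pvLoopS ls (secs ++ [PySem.Str.join "\n" cur]) [PySem.Str.strip l] := by
        simp only [pvLoopS]
        rw [if_pos hh, if_neg hce]
      have h2 : splitOutlineStepB (secs ++ [PySem.Str.join "\n" cur]) l
          = (secs ++ [PySem.Str.join "\n" cur]) ++ [PySem.Str.strip l] := by
        simp only [splitOutlineStepB]
        rw [if_pos hh]
      rw [h1, ih _ _ (by simp), List.foldl_cons, h2, join_singleton_str]
    · have h1 : pvLoopS (l :: ls) secs cur = pvLoopS ls secs (cur ++ [PySem.Str.strip l]) := by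
        simp only [pvLoopS]
        rw [if_neg hh, if_pos (show (!cur.isEmpty) = true by simp [h])]
      have h2 : splitOutlineStepB (secs ++ [PySem.Str.join "\n" cur]) l
          = secs ++ [PySem.Str.join "\n" cur ++ "\n" ++ PySem.Str.strip l] := by
        simp only [splitOutlineStepB]
        rw [if_neg hh]
        simp
      rw [h1, ih _ _ (by simp), List.foldl_cons, h2, join_concat _ _ h]

-- after the dropWhile, the body is empty or starts with a header
theorem loopS_body (body : List String)
    (hb : ∀ l rest, body = l :: rest → PySem.Str.startswith l "## " = true) :
    ∀ secs : List String, pvLoopS body secs [] = body.foldl splitOutlineStepB secs := by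
  cases body with
  | nil => intro secs; simp [pvLoopS]
  | cons l rest =>
    intro secs
    have hh := hb l rest rfl
    have h1 : pvLoopS (l :: rest) secs [] = pvLoopS rest secs [PySem.Str.strip l] := by
      simp only [pvLoopS]
      rw [if_pos hh, if_pos (show (List.isEmpty ([] : List String)) = true from rfl)]
    have h2 : splitOutlineStepB secs l = secs ++ [PySem.Str.strip l] := by
      simp only [splitOutlineStepB]
      rw [if_pos hh]
    rw [h1, loopS_eq_foldB _ _ _ (by simp), List.foldl_cons, h2, join_singleton_str]

-- ===== VERDICT (by name: the statement is the Claim_ definition above) =====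
theorem split_outline_py_spec : Claim_equal_split_outline_py := by
  intro outline _
  unfold Spec_split_outline_py split_outline_py split_outline_py_alt
  rw [loopA_eq]
  have hdrop : ∀ l rest,
      ((PySem.Str.splitlines outline).filter (fun l => !pvIsTitle l)).dropWhile
          (fun l => !PySem.Str.startswith l "## ") = l :: rest →
      PySem.Str.startswith l "## " = true := by
    intro l rest h
    have h2 := List.head?_dropWhile_not (fun l => !PySem.Str.startswith l "## ")
      ((PySem.Str.splitlines outline).filter (fun l => !pvIsTitle l))
    rw [h] at h2
    simpa using h2
  rw [lastTitle_eq_find, loopS_dropWhile, loopS_body _ hdrop]
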